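-- pv_equiv track=rewrite | github.com/jjwatt/aoc2025 | puzzle6.py | calculate_columns
-- ===== SOURCE A (Python) =====
-- import operator
-- from functools import reduce
--
-- def calculate_columns(cols):
--     """Calculate the result of each column, scan right to left."""
--     total = 0
--     cur_nums = []
--     cur_op = None
--     for col in reversed(cols):
--         if all(c == ' ' for c in col):
--             if cur_nums and cur_op:
--                 match cur_op:
--                     case '+':
--                         total += reduce(operator.add, cur_nums)
--                     case '*':
--                         total += reduce(operator.mul, cur_nums)
--                     case _:
--                         raise ValueError(f"Invalid operator: {cur_op}")
--             cur_nums = []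
--             cur_op = None
--             continue
--
--         digits = "".join(col[:-1]).strip()
--         if digits:
--             cur_nums.append(int(digits))
--
--         bottom_char = col[-1]
--         if bottom_char in ('+', '*'):
--             cur_op = bottom_char
--
--     if cur_nums and cur_op:
--         match cur_op:
--             case '+':
--                 total += reduce(operator.add, cur_nums)
--             case '*':
--                 total += reduce(operator.mul, cur_nums)
--             case _:
--                 raise ValueError(f"Invalid operator: {cur_op}")
--     return total
-- ===== SOURCE B (Python) =====
-- def calculate_columns(cols):
--     """Calculate the result of each column, scan right to left."""
--     def blank(col):
--         return all(c == ' ' for c in col)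
--
--     # Partition cols into contiguous groups separated by blank columns.
--     groups = []
--     cur = []
--     for col in cols:
--         if blank(col):
--             groups.append(cur)
--             cur = []
--         else:
--             cur.append(col)
--     groups.append(cur)
--
--     total = 0
--     for g in groups:
--         nums = []
--         op = None
--         for col in g:
--             s = "".join(col[:-1]).strip()
--             if s:
--                 nums.append(int(s))
--             if op is None and col[-1] in ('+', '*'):
--                 op = col[-1]
--         if nums and op:
--             if op == '+':
--                 r = sum(nums)
--             else:
--                 r = 1
--                 for n in nums:
--                     r *= n
--             total += r
--     return total
-- ===== Notes on version B (the rewrite author's own statement) =====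
-- stated objective: alternative
-- what changed: Replaced A's reversed stateful scan (accumulator flushed at each blank column, last-write-wins operator) by a forward partition of the columns into blank-separated groups followed by per-group evaluation with sum/product and first-operator-wins.
import Mathlib
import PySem

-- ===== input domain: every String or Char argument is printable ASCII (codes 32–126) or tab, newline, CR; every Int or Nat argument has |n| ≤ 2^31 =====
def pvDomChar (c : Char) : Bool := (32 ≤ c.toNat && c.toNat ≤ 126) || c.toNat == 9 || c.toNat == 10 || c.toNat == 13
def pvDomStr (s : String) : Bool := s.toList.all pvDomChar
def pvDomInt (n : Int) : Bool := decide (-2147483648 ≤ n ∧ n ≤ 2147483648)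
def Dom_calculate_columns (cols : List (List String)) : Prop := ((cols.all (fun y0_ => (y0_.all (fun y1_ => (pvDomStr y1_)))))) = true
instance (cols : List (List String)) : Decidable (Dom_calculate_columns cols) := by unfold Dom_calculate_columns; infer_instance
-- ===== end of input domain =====

-- B replaces A's reversed stateful scan by a forward partition into blank-separated
-- groups evaluated independently (sum/product, first-operator-wins); same cost.

-- ===== PORT A =====
def ccA_isBlank (col : List String) : Bool := col.all (fun c => c == " ")

def ccA_reduceAdd (nums : List Int) : Int :=
  match nums with | [] => 0 | n :: rest => rest.foldl (· + ·) n

def ccA_reduceMul (nums : List Int) : Int :=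
  match nums with | [] => 0 | n :: rest => rest.foldl (· * ·) n

-- the 'if cur_nums and cur_op: match cur_op: …' block
def ccA_flush (total : Int) (nums : List Int) (op : Option String) : Int :=
  if !nums.isEmpty && op.isSome then
    match op with
    | some "+" => total + ccA_reduceAdd nums
    | some "*" => total + ccA_reduceMul nums
    | _ => total  -- Python's ValueError branch, unreachable: cur_op is only ever set to "+" or "*"
  else total

def ccA_step (st : Int × List Int × Option String) (col : List String) :
    Int × List Int × Option String :=
  match st with
  | (total, nums, op) =>
    if ccA_isBlank col then (ccA_flush total nums op, [], none)
    else
      let digits := PySem.Str.strip (PySem.Str.join "" col.dropLast)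
      -- int(digits): Python raises ValueError on an unparsable string; Pre_ excludes that,
      -- so the default 0 is never taken on admitted inputs
      let nums := if digits ≠ "" then nums ++ [(PySem.Int.ofStr? digits).getD 0] else nums
      let bottom := (PySem.List.pyGet? col (-1)).getD ""  -- col[-1]; col ≠ [] here (not all-blank)
      let op := if bottom == "+" || bottom == "*" then some bottom else op
      (total, nums, op)

def calculate_columns (cols : List (List String)) : Int :=
  match cols.reverse.foldl ccA_step (0, [], none) with
  | (total, nums, op) => ccA_flush total nums op

-- ===== PORT B =====
def ccB_isBlank (col : List String) : Bool := col.all (fun c => c == " ")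

def ccB_partStep (st : List (List (List String)) × List (List String)) (col : List String) :
    List (List (List String)) × List (List String) :=
  match st with
  | (groups, cur) =>
    if ccB_isBlank col then (groups ++ [cur], []) else (groups, cur ++ [col])

def ccB_part (cols : List (List String)) : List (List (List String)) :=
  match cols.foldl ccB_partStep ([], []) with
  | (groups, cur) => groups ++ [cur]

def ccB_scanStep (st : List Int × Option String) (col : List String) : List Int × Option String :=
  match st with
  | (nums, op) =>
    let s := PySem.Str.strip (PySem.Str.join "" col.dropLast)
    let nums := if s ≠ "" then nums ++ [(PySem.Int.ofStr? s).getD 0] else nums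
    let bottom := (PySem.List.pyGet? col (-1)).getD ""
    let op := if op == none && (bottom == "+" || bottom == "*") then some bottom else op
    (nums, op)

def ccB_val (g : List (List String)) : Int :=
  match g.foldl ccB_scanStep ([], none) with
  | (nums, op) =>
    if !nums.isEmpty && op.isSome then
      (if op == some "+" then nums.foldl (· + ·) 0 else nums.foldl (· * ·) 1)
    else 0

def calculate_columns_alt (cols : List (List String)) : Int :=
  (ccB_part cols).foldl (fun total g => total + ccB_val g) 0

-- ===== PRECONDITION & SPEC =====
-- Pre_ excludes exactly the inputs where Python A raises ValueError: a non-blank column whose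
-- joined-and-stripped upper part is non-empty but not a valid int literal.
def Pre_calculate_columns (cols : List (List String)) : Prop :=
  ∀ col ∈ cols, (col.all (fun c => c == " ")) = false →
    (PySem.Str.strip (PySem.Str.join "" col.dropLast) = "" ∨
     (PySem.Int.ofStr? (PySem.Str.strip (PySem.Str.join "" col.dropLast))).isSome = true)
instance (cols : List (List String)) : Decidable (Pre_calculate_columns cols) := by
  unfold Pre_calculate_columns; infer_instance

def pvWitness_calculate_columns : List (List String) :=
  [["1", "+"], ["2", " "], [" ", " "], ["3", "4", "*"]]

def Spec_calculate_columns (cols : List (List String)) (out : Int) : Prop := out = calculate_columns_alt cols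
instance (cols : List (List String)) (out : Int) : Decidable (Spec_calculate_columns cols out) := by unfold Spec_calculate_columns; infer_instance

-- ===== CLAIM (what is proved, stated in full; the proofs are below) =====
def Claim_equal_calculate_columns : Prop := ∀ (cols : List (List String)), Dom_calculate_columns cols → Pre_calculate_columns cols → Spec_calculate_columns cols (calculate_columns cols)

-- ===== LEMMAS AND PROOFS =====

-- canonical per-column / per-group views
def pvNum? (col : List String) : Option Int :=
  let s := PySem.Str.strip (PySem.Str.join "" col.dropLast)
  if s = "" then none else some ((PySem.Int.ofStr? s).getD 0)

def pvOp? (col : List String) : Option String :=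
  let b := (PySem.List.pyGet? col (-1)).getD ""
  if b == "+" || b == "*" then some b else none

def pvNums (g : List (List String)) : List Int := g.filterMap pvNum?
def pvOp (g : List (List String)) : Option String := g.findSome? pvOp?

def pvSplit : List (List String) → List (List (List String))
  | [] => [[]]
  | c :: rest =>
    if ccA_isBlank c then [] :: pvSplit rest
    else
      match pvSplit rest with
      | g :: gs => (c :: g) :: gs
      | [] => [[c]]

theorem pvSplit_ne_nil (l : List (List String)) : pvSplit l ≠ [] := by
  cases l with
  | nil => simp [pvSplit]
  | cons c rest =>
    simp only [pvSplit]
    split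
    · simp
    · split <;> simp

theorem foldl_add_eq (l : List Int) : ∀ a : Int, l.foldl (· + ·) a = a + l.sum := by
  induction l with
  | nil => simp
  | cons x t ih => intro a; simp [List.foldl_cons, ih, List.sum_cons]; ring

theorem foldl_mul_eq (l : List Int) : ∀ a : Int, l.foldl (· * ·) a = a * l.prod := by
  induction l with
  | nil => simp
  | cons x t ih => intro a; simp [List.foldl_cons, ih, List.prod_cons]; ring

theorem reduceAdd_eq (l : List Int) (h : l ≠ []) : ccA_reduceAdd l = l.sum := by
  cases l with
  | nil => simp at h
  | cons n t => simp [ccA_reduceAdd, foldl_add_eq]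

theorem reduceMul_eq (l : List Int) (h : l ≠ []) : ccA_reduceMul l = l.prod := by
  cases l with
  | nil => simp at h
  | cons n t => simp [ccA_reduceMul, foldl_mul_eq]

-- B's scan is componentwise
def pvNumF (nums : List Int) (col : List String) : List Int :=
  let s := PySem.Str.strip (PySem.Str.join "" col.dropLast)
  if s ≠ "" then nums ++ [(PySem.Int.ofStr? s).getD 0] else nums

def pvOpF (op : Option String) (col : List String) : Option String :=
  let bottom := (PySem.List.pyGet? col (-1)).getD ""
  if op == none && (bottom == "+" || bottom == "*") then some bottom else op

theorem scanStep_eq : ccB_scanStep = fun st col => (pvNumF st.1 col, pvOpF st.2 col) := by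
  funext st col; cases st; rfl

theorem foldl_prod_split {α β γ : Type} (f : α → γ → α) (g : β → γ → β) (l : List γ) :
    ∀ (a : α) (b : β),
      l.foldl (fun st c => (f st.1 c, g st.2 c)) (a, b) = (l.foldl f a, l.foldl g b) := by
  induction l with
  | nil => intro a b; rfl
  | cons x t ih => intro a b; simp [List.foldl_cons, ih]

theorem foldl_numF (g : List (List String)) : ∀ nums, g.foldl pvNumF nums = nums ++ pvNums g := by
  induction g with
  | nil => intro nums; simp [pvNums]
  | cons col t ih =>
    intro nums
    simp only [List.foldl_cons, ih, pvNums, List.filterMap_cons]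
    by_cases hs : PySem.Str.strip (PySem.Str.join "" col.dropLast) = "" <;>
      simp [pvNumF, pvNum?, hs]

theorem foldl_opF_some (g : List (List String)) (x : String) :
    g.foldl pvOpF (some x) = some x := by
  induction g with
  | nil => rfl
  | cons col t ih => simp [List.foldl_cons, pvOpF, ih]

theorem foldl_opF_none (g : List (List String)) : g.foldl pvOpF none = pvOp g := by
  induction g with
  | nil => rfl
  | cons col t ih =>
    simp only [List.foldl_cons, pvOp, List.findSome?_cons]
    by_cases hb : (((PySem.List.pyGet? col (-1)).getD "" == "+") ||
        ((PySem.List.pyGet? col (-1)).getD "" == "*")) = true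
    · simp [pvOpF, pvOp?, hb, foldl_opF_some]
    · simp only [Bool.not_eq_true] at hb
      simp [pvOpF, pvOp?, hb, ih, pvOp]

theorem scan_eq (g : List (List String)) :
    g.foldl ccB_scanStep ([], none) = (pvNums g, pvOp g) := by
  rw [scanStep_eq, foldl_prod_split, foldl_numF, foldl_opF_none]
  simp

theorem pvOp_cases (g : List (List String)) :
    pvOp g = none ∨ pvOp g = some "+" ∨ pvOp g = some "*" := by
  induction g with
  | nil => left; rfl
  | cons col t ih =>
    simp only [pvOp, List.findSome?_cons] at *
    by_cases h1 : ((PySem.List.pyGet? col (-1)).getD "" == "+") = true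
    · right; left; simp [pvOp?, h1]; simpa using h1
    · by_cases h2 : ((PySem.List.pyGet? col (-1)).getD "" == "*") = true
      · right; right
        simp only [Bool.not_eq_true] at h1
        simp [pvOp?, h1, h2]; simpa using h2
      · simp only [Bool.not_eq_true] at h1 h2
        simpa [pvOp?, h1, h2] using ih

theorem flush_eq (g : List (List String)) (t : Int) :
    ccA_flush t (pvNums g).reverse (pvOp g) = t + ccB_val g := by
  have hval : ccB_val g =
      (match (pvNums g, pvOp g) with
       | (nums, op) =>
         if !nums.isEmpty && op.isSome then
           (if op == some "+" then nums.foldl (· + ·) 0 else nums.foldl (· * ·) 1)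
         else 0) := by
    simp [ccB_val, scan_eq]
  by_cases hn : pvNums g = []
  · simp [ccA_flush, hval, hn]
  · rcases pvOp_cases g with hop | hop | hop
    · simp [ccA_flush, hval, hop]
    · have hne : (pvNums g).reverse ≠ [] := by simpa using hn
      simp only [hval, hop, ccA_flush]
      simp [hn, reduceAdd_eq _ hne, foldl_add_eq, List.sum_reverse]
    · have hne : (pvNums g).reverse ≠ [] := by simpa using hn
      simp only [hval, hop, ccA_flush]
      simp [hn, reduceMul_eq _ hne, foldl_mul_eq, List.prod_reverse]


theorem ccA_step_nonblank (t : Int) (nums : List Int) (op : Option String)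
    (c : List String) (hb : ccA_isBlank c = false) :
    ccA_step (t, nums, op) c =
      (t, pvNumF nums c,
       if ((PySem.List.pyGet? c (-1)).getD "" == "+" || (PySem.List.pyGet? c (-1)).getD "" == "*")
       then some ((PySem.List.pyGet? c (-1)).getD "") else op) := by
  simp [ccA_step, hb, pvNumF]

-- A's reversed scan, read as a foldr, maintains the group structure of pvSplit
theorem A_inv (cols : List (List String)) :
    ∀ g gs, pvSplit cols = g :: gs →
      cols.foldr (fun col st => ccA_step st col) ((0 : Int), ([] : List Int), (none : Option String)) =
        ((gs.map ccB_val).sum, (pvNums g).reverse, pvOp g) := by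
  induction cols with
  | nil =>
    intro g gs h
    simp only [pvSplit] at h
    cases h
    simp [pvNums, pvOp]
  | cons c rest ih =>
    intro g gs h
    obtain ⟨g', gs', hrest⟩ : ∃ g' gs', pvSplit rest = g' :: gs' := by
      cases hr : pvSplit rest with
      | nil => exact absurd hr (pvSplit_ne_nil rest)
      | cons a b => exact ⟨a, b, rfl⟩
    simp only [List.foldr_cons, ih g' gs' hrest]
    by_cases hb : ccA_isBlank c = true
    · simp only [pvSplit, hb, if_pos rfl, hrest] at h
      simp only [if_true] at h
      cases h
      simp only [ccA_step, hb, if_pos rfl, if_true]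
      rw [flush_eq]
      simp [pvNums, pvOp, List.sum_cons]
      ring
    · simp only [Bool.not_eq_true] at hb
      simp only [pvSplit, hb, Bool.false_eq_true, if_false, hrest] at h
      cases h
      rw [ccA_step_nonblank _ _ _ _ hb]
      simp only [Prod.mk.injEq]
      refine ⟨trivial, ?_, ?_⟩
      · -- nums component
        by_cases hs : PySem.Str.strip (PySem.Str.join "" c.dropLast) = "" <;>
          simp [pvNums, List.filterMap_cons, pvNum?, pvNumF, hs]
      · -- op component
        simp only [pvOp, List.findSome?_cons]
        by_cases hop : (((PySem.List.pyGet? c (-1)).getD "" == "+") ||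
            ((PySem.List.pyGet? c (-1)).getD "" == "*")) = true
        · simp [hop, pvOp?]
        · simp only [Bool.not_eq_true] at hop
          simp [hop, pvOp?, pvOp]

theorem part_go (l : List (List String)) :
    ∀ (groups : List (List (List String))) (cur : List (List String)),
      (match l.foldl ccB_partStep (groups, cur) with
       | (gs, c) => gs ++ [c]) = groups ++ (pvSplit l).modifyHead (cur ++ ·) := by
  induction l with
  | nil => intro groups cur; simp [pvSplit]
  | cons c rest ih =>
    intro groups cur
    obtain ⟨g', gs', hrest⟩ : ∃ g' gs', pvSplit rest = g' :: gs' := by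
      cases hr : pvSplit rest with
      | nil => exact absurd hr (pvSplit_ne_nil rest)
      | cons a b => exact ⟨a, b, rfl⟩
    have hbb : ccB_isBlank c = ccA_isBlank c := rfl
    by_cases hb : ccA_isBlank c = true
    · simp only [List.foldl_cons, ccB_partStep, hbb, hb, if_pos rfl, if_true, ih, pvSplit, hrest]
      simp
    · simp only [Bool.not_eq_true] at hb
      simp only [List.foldl_cons, ccB_partStep, hbb, hb, Bool.false_eq_true, if_false, ih,
        pvSplit, hrest]
      simp

theorem part_eq (cols : List (List String)) : ccB_part cols = pvSplit cols := by
  have h := part_go cols [] []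
  simp only [List.nil_append] at h
  obtain ⟨g, gs, hs⟩ : ∃ g gs, pvSplit cols = g :: gs := by
    cases hr : pvSplit cols with
    | nil => exact absurd hr (pvSplit_ne_nil cols)
    | cons a b => exact ⟨a, b, rfl⟩
  rw [ccB_part]
  rw [hs] at h ⊢
  simpa using h

theorem foldl_addVal (l : List (List (List String))) :
    ∀ t : Int, l.foldl (fun total g => total + ccB_val g) t = t + (l.map ccB_val).sum := by
  induction l with
  | nil => intro t; simp
  | cons g gs ih => intro t; simp [List.foldl_cons, ih, List.sum_cons]; ring

-- ===== VERDICT (by name: the statement is the Claim_ definition above) =====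
theorem calculate_columns_spec : Claim_equal_calculate_columns := by
  intro cols _ _
  unfold Spec_calculate_columns
  obtain ⟨g, gs, hs⟩ : ∃ g gs, pvSplit cols = g :: gs := by
    cases hr : pvSplit cols with
    | nil => exact absurd hr (pvSplit_ne_nil cols)
    | cons a b => exact ⟨a, b, rfl⟩
  have hA : calculate_columns cols = (gs.map ccB_val).sum + ccB_val g := by
    rw [calculate_columns, List.foldl_reverse]
    have := A_inv cols g gs hs
    simp only [this]
    rw [flush_eq]
  have hB : calculate_columns_alt cols = ccB_val g + (gs.map ccB_val).sum := by
    rw [calculate_columns_alt, part_eq, hs, foldl_addVal]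
    simp [List.sum_cons]
  rw [hA, hB]; ring
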